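-- pv_equiv track=rewrite | github.com/daniel-reich/ubiquitous-fiesta | 8qD23E6XRMaWhyJ5z_7.py | happiness_number
-- ===== SOURCE A (Python) =====
-- def happiness_number(s):
--
--   sum = 0
--   for i in range(len(s)-1):
--     if (s[i] == ":" and s[i+1] == ")") or (s[i] == "(" and s[i+1] == ":"):
--       sum = sum + 1
--     elif (s[i] == ":" and s[i+1] == "(") or (s[i] == ")" and s[i+1] == ":"):
--       sum = sum - 1
--     else:
--       sum = sum + 0
--
--   return sum
-- ===== SOURCE B (Python) =====
-- def happiness_number(s):
--   return s.count(':)') + s.count('(:') - s.count(':(') - s.count('):')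
-- ===== Notes on version B (the rewrite author's own statement) =====
-- stated objective: simpler
-- what changed: The index loop with its three-way branch is replaced by four aggregate str.count substring counts (each two-character pattern has distinct characters, so non-overlapping counting sees every occurrence); no explicit iteration or branching remains, and the scan runs in C via str.count rather than Python byte-code.
import Mathlib
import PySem

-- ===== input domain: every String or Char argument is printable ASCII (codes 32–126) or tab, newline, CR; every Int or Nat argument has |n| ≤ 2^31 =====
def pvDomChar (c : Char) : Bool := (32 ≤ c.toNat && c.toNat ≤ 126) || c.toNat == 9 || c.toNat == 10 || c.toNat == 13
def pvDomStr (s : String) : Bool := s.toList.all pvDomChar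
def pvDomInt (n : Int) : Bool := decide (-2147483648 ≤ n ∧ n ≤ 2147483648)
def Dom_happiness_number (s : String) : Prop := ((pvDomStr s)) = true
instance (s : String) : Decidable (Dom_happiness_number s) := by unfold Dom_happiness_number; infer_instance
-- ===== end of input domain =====

-- B replaces A's index loop and branch chain by four aggregate substring counts (simpler; same O(n) cost).

-- ===== PORT A =====
-- literal transliteration of A: for i in range(len(s)-1), the three-way branch on s[i], s[i+1]
def happiness_number (s : String) : Int :=
  (PySem.List.pyRange 0 ((PySem.Str.len s : Int) - 1) 1).foldl
    (fun sum i =>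
      if (PySem.List.pyGetD s.toList i ' ' == ':' && PySem.List.pyGetD s.toList (i+1) ' ' == ')')
         || (PySem.List.pyGetD s.toList i ' ' == '(' && PySem.List.pyGetD s.toList (i+1) ' ' == ':') then
        sum + 1
      else if (PySem.List.pyGetD s.toList i ' ' == ':' && PySem.List.pyGetD s.toList (i+1) ' ' == '(')
              || (PySem.List.pyGetD s.toList i ' ' == ')' && PySem.List.pyGetD s.toList (i+1) ' ' == ':') then
        sum - 1
      else
        sum + 0) 0

-- ===== PORT B =====
-- literal transliteration of B: s.count(':)') + s.count('(:') - s.count(':(') - s.count('):')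
def happiness_number_alt (s : String) : Int :=
  (PySem.Str.count s ":)" : Int) + (PySem.Str.count s "(:" : Int)
    - (PySem.Str.count s ":(" : Int) - (PySem.Str.count s "):" : Int)

-- ===== PRECONDITION & SPEC =====
def Spec_happiness_number (s : String) (out : Int) : Prop := out = happiness_number_alt s
instance (s : String) (out : Int) : Decidable (Spec_happiness_number s out) := by unfold Spec_happiness_number; infer_instance

-- ===== CLAIM (what is proved, stated in full; the proofs are below) =====
def Claim_equal_happiness_number : Prop := ∀ (s : String), Dom_happiness_number s → Spec_happiness_number s (happiness_number s)

-- ===== LEMMAS AND PROOFS =====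

-- number of positions k with cs[k] = a and cs[k+1] = b (adjacent-pair count)
def pvPairCount (a b : Char) : List Char → Nat
  | x :: y :: t => (if x = a ∧ y = b then 1 else 0) + pvPairCount a b (y :: t)
  | _ => 0

lemma pvPairCount_cons_ne_head (a b x : Char) (t : List Char) (hx : x ≠ a) :
    pvPairCount a b (x :: t) = pvPairCount a b t := by
  cases t with
  | nil => simp [pvPairCount]
  | cons y r => simp [pvPairCount, hx]

lemma pvCount_go_eq (a b : Char) (hab : a ≠ b) :
    ∀ (fuel : Nat) (l : List Char) (acc : Nat), l.length ≤ fuel →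
      PySem.Chars.count.go [a, b] fuel l acc = acc + pvPairCount a b l := by
  intro fuel
  induction fuel with
  | zero =>
    intro l acc hl
    have : l = [] := by cases l <;> simp_all
    subst this
    simp [PySem.Chars.count.go, pvPairCount]
  | succ n ih =>
    intro l acc hl
    match l with
    | [] => simp [PySem.Chars.count.go, pvPairCount]
    | [x] =>
      have hp : [a, b].isPrefixOf [x] = false := by simp [List.isPrefixOf]
      simp [PySem.Chars.count.go, hp, pvPairCount] at *
      rw [ih [] acc (by simp)]
      simp [pvPairCount]
    | x :: y :: t =>
      by_cases hm : x = a ∧ y = b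
      · obtain ⟨hx, hy⟩ := hm; subst hx; subst hy
        have hstep : PySem.Chars.count.go [x, y] (n + 1) (x :: y :: t) acc
            = PySem.Chars.count.go [x, y] n t (acc + 1) := by
          simp [PySem.Chars.count.go, List.isPrefixOf]
        rw [hstep, ih t (acc + 1) (by simp at hl; omega)]
        have h1 : pvPairCount x y (x :: y :: t) = 1 + pvPairCount x y (y :: t) := by
          simp [pvPairCount]
        rw [h1, pvPairCount_cons_ne_head x y y t (Ne.symm hab)]
        omega
      · have hp : [a, b].isPrefixOf (x :: y :: t) = false := by
          simp [List.isPrefixOf]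
          intro hx hy
          exact hm ⟨hx.symm, hy.symm⟩
        have hstep : PySem.Chars.count.go [a, b] (n + 1) (x :: y :: t) acc
            = PySem.Chars.count.go [a, b] n (y :: t) acc := by
          simp [PySem.Chars.count.go, hp]
        rw [hstep, ih (y :: t) acc (by simp at hl ⊢; omega)]
        have h0 : pvPairCount a b (x :: y :: t) = pvPairCount a b (y :: t) := by
          simp [pvPairCount]
          intro hx hy
          exact absurd ⟨hx, hy⟩ hm
        rw [h0]

lemma pvCount_pair (a b : Char) (hab : a ≠ b) (cs : List Char) :
    PySem.Chars.count cs [a, b] = pvPairCount a b cs := by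
  simp [PySem.Chars.count]
  rw [pvCount_go_eq a b hab cs.length cs 0 le_rfl]
  exact Nat.zero_add _

-- the per-position score of A's branch chain
def pvScore (x y : Char) : Int :=
  if (x == ':' && y == ')') || (x == '(' && y == ':') then 1
  else if (x == ':' && y == '(') || (x == ')' && y == ':') then -1
  else 0

-- fold of a pair function over the adjacent pairs of a list
def pvFoldPairs (g : Char → Char → Int) : List Char → Int
  | x :: y :: t => g x y + pvFoldPairs g (y :: t)
  | _ => 0

lemma pvScore_eq_counts (x y : Char) :
    pvScore x y = (if x = ':' ∧ y = ')' then (1 : Int) else 0)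
      + (if x = '(' ∧ y = ':' then (1 : Int) else 0)
      - (if x = ':' ∧ y = '(' then (1 : Int) else 0)
      - (if x = ')' ∧ y = ':' then (1 : Int) else 0) := by
  simp only [pvScore, Bool.or_eq_true, Bool.and_eq_true, beq_iff_eq]
  split_ifs <;> simp_all

lemma pvFoldPairs_score_eq_counts (cs : List Char) :
    pvFoldPairs pvScore cs
      = (pvPairCount ':' ')' cs : Int) + (pvPairCount '(' ':' cs : Int)
        - (pvPairCount ':' '(' cs : Int) - (pvPairCount ')' ':' cs : Int) := by
  induction cs with
  | nil => simp [pvFoldPairs, pvPairCount]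
  | cons x t ih =>
    cases t with
    | nil => simp [pvFoldPairs, pvPairCount]
    | cons y r =>
      have hx : pvFoldPairs pvScore (x :: y :: r) = pvScore x y + pvFoldPairs pvScore (y :: r) := rfl
      have hc : ∀ a b : Char, pvPairCount a b (x :: y :: r)
          = (if x = a ∧ y = b then 1 else 0) + pvPairCount a b (y :: r) := fun a b => rfl
      rw [hx, ih, hc, hc, hc, hc, pvScore_eq_counts]
      push_cast
      ring

lemma pvSum_range_pairs (g : Char → Char → Int) :
    ∀ cs : List Char,
      ((List.range (cs.length - 1)).map (fun k => g (cs.getD k ' ') (cs.getD (k + 1) ' '))).sum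
        = pvFoldPairs g cs := by
  intro cs
  induction cs with
  | nil => simp [pvFoldPairs]
  | cons x t ih =>
    cases t with
    | nil => simp [pvFoldPairs]
    | cons y r =>
      have hlen : (x :: y :: r).length - 1 = (y :: r).length := by simp
      rw [hlen]
      have hlen2 : (y :: r).length = ((y :: r).length - 1) + 1 := by simp
      rw [hlen2, List.range_succ_eq_map]
      simp only [List.map_cons, List.map_map, List.sum_cons]
      have htail :
          ((List.range ((y :: r).length - 1)).map
            ((fun k => g ((x :: y :: r).getD k ' ') ((x :: y :: r).getD (k + 1) ' ')) ∘ Nat.succ)).sum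
          = ((List.range ((y :: r).length - 1)).map
              (fun k => g ((y :: r).getD k ' ') ((y :: r).getD (k + 1) ' '))).sum := by
        apply congrArg
        apply List.map_congr_left
        intro k _
        simp [Function.comp]
      rw [htail, ih]
      rfl

lemma happiness_number_eq_fold (s : String) :
    happiness_number s = pvFoldPairs pvScore s.toList := by
  unfold happiness_number
  have hbody : (fun (sum : Int) (i : Int) =>
      if (PySem.List.pyGetD s.toList i ' ' == ':' && PySem.List.pyGetD s.toList (i+1) ' ' == ')')
         || (PySem.List.pyGetD s.toList i ' ' == '(' && PySem.List.pyGetD s.toList (i+1) ' ' == ':') then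
        sum + 1
      else if (PySem.List.pyGetD s.toList i ' ' == ':' && PySem.List.pyGetD s.toList (i+1) ' ' == '(')
              || (PySem.List.pyGetD s.toList i ' ' == ')' && PySem.List.pyGetD s.toList (i+1) ' ' == ':') then
        sum - 1
      else
        sum + 0)
      = fun (sum : Int) (i : Int) =>
          sum + pvScore (PySem.List.pyGetD s.toList i ' ') (PySem.List.pyGetD s.toList (i+1) ' ') := by
    funext sum i
    simp only [pvScore]
    split_ifs <;> ring
  rw [hbody, PySem.List.foldl_add, PySem.List.pyRange_one]
  have hlen : PySem.Str.len s = (s.toList.length : Int) := by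
    simp [PySem.Str.len_eq]
  rw [hlen]
  have htn : (((s.toList.length : Int)) - 1 - 0).toNat = s.toList.length - 1 := by omega
  rw [htn, List.map_map]
  have hmap : ((List.range (s.toList.length - 1)).map
      ((fun i => pvScore (PySem.List.pyGetD s.toList i ' ') (PySem.List.pyGetD s.toList (i+1) ' '))
        ∘ (fun k : Nat => (0 : Int) + ↑k)))
      = (List.range (s.toList.length - 1)).map
          (fun k => pvScore (s.toList.getD k ' ') (s.toList.getD (k + 1) ' ')) := by
    apply List.map_congr_left
    intro k _
    have h1 : (0 : Int) + (k : Int) = ((k : Nat) : Int) := by omega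
    have h2 : (k : Int) + 1 = (((k + 1 : Nat)) : Int) := by push_cast; ring
    simp only [Function.comp, h1, h2, PySem.List.pyGetD_natCast]
  rw [hmap, pvSum_range_pairs]
  ring

lemma happiness_number_alt_eq_counts (s : String) :
    happiness_number_alt s
      = (pvPairCount ':' ')' s.toList : Int) + (pvPairCount '(' ':' s.toList : Int)
        - (pvPairCount ':' '(' s.toList : Int) - (pvPairCount ')' ':' s.toList : Int) := by
  unfold happiness_number_alt
  have h1 : (":)" : String).toList = [':', ')'] := rfl
  have h2 : ("(:" : String).toList = ['(', ':'] := rfl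
  have h3 : (":(" : String).toList = [':', '('] := rfl
  have h4 : ("):" : String).toList = [')', ':'] := rfl
  simp only [PySem.Str.count, h1, h2, h3, h4]
  rw [pvCount_pair ':' ')' (by decide), pvCount_pair '(' ':' (by decide),
      pvCount_pair ':' '(' (by decide), pvCount_pair ')' ':' (by decide)]

-- ===== VERDICT (by name: the statement is the Claim_ definition above) =====
theorem happiness_number_spec : Claim_equal_happiness_number := by
  intro s _
  unfold Spec_happiness_number
  rw [happiness_number_eq_fold, happiness_number_alt_eq_counts,
      pvFoldPairs_score_eq_counts]
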